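-- pv_equiv track=rewrite | github.com/DaemonStark/Competitive-Programming | Kick Start/2020/temp.py | solve
-- ===== SOURCE A (Python) =====
-- def solve(num):
--     if num == 0:
--         return 0
--     s = list(map(int, str(num)))
--     l = len(s)
--     ans = (5 ** l - 5) // 4
--     odd = True
--     for i in range(l):
--         cur = s[i]
--         curodd = (s[i] % 2 == 1)
--         start = 1 if odd else 0
--         count = 0
--         while start < cur:
--             count += 1
--             start += 2
--         ans += count * 5 ** (l - i - 1)
--         if odd != curodd:
--             return ans
--         odd = not odd
--     return ans + 1
-- ===== SOURCE B (Python) =====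
-- def solve(num):
--     if num == 0:
--         return 0
--     s = list(map(int, str(num)))
--     return _shorter(len(s) - 1) + _tight(s, True)
--
--
-- def _shorter(k):
--     # count of valid numbers having fewer digits: 5**1 + 5**2 + ... + 5**k
--     return 0 if k <= 0 else 5 ** k + _shorter(k - 1)
--
--
-- def _tight(digits, expect_odd):
--     # count of valid completions that match the prefix consumed so far and do
--     # not exceed the bound given by `digits`; parity required here is `start`
--     if not digits:
--         return 1
--     d, rest = digits[0], digits[1:]
--     start = 1 if expect_odd else 0
--     below = (d - start + 1) // 2  # digits of the required parity strictly below d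
--     total = below * 5 ** len(rest)
--     if d % 2 == start:
--         total += _tight(rest, not expect_odd)
--     return total
-- ===== Notes on version B (the rewrite author's own statement) =====
-- stated objective: alternative
-- what changed: Replaces A's imperative index loop with mutable accumulator, inner counting while-loop and early return by a recursive tight digit-count helper using a closed-form half-interval count per digit, plus a recursive geometric sum for the shorter-length count instead of A's closed-form power formula.
import Mathlib
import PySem

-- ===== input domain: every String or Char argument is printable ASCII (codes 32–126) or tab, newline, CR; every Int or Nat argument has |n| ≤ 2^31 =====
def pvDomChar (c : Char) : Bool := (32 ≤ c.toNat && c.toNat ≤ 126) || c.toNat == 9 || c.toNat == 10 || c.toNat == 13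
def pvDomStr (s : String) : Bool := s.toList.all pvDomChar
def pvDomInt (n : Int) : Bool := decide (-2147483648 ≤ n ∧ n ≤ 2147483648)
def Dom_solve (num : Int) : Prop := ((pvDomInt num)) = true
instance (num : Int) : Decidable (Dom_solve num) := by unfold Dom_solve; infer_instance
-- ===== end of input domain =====

-- B replaces A's index loop + inner counting while-loop + early return by a recursive
-- tight digit count with a closed-form per-digit count; same values, no speed claim.

-- ===== PORT A =====
-- `list(map(int, str(num)))` — shared by both Pythons verbatim, so a shared helper
def pyDigitList (num : Int) : List Int :=
  (PySem.Int.toChars num).map (fun c => (PySem.Int.ofChars? [c]).getD 0)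

-- inner `while start < cur: count += 1; start += 2` of A
def whileCount (start cur : Int) : Int :=
  if start < cur then 1 + whileCount (start + 2) cur else 0
termination_by (cur - start).toNat
decreasing_by omega

-- `for i in range(l)` over the remaining digits, state (odd, ans); early `return ans`
def solveLoop : List Int → Bool → Int → Int
  | [], _, ans => ans + 1
  | cur :: rest, odd, ans =>
    let start : Int := if odd then 1 else 0
    let count := whileCount start cur
    let ans := ans + count * 5 ^ rest.length
    if odd != (PySem.Int.mod cur 2 == 1) then ans
    else solveLoop rest (!odd) ans

def solve (num : Int) : Int :=
  if num == 0 then 0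
  else
    let s := pyDigitList num
    let l := s.length
    let ans := PySem.Int.floordiv (5 ^ l - 5) 4
    solveLoop s true ans

-- ===== PORT B =====
def shorterB (k : Int) : Int :=
  if k ≤ 0 then 0 else 5 ^ k.toNat + shorterB (k - 1)
termination_by k.toNat
decreasing_by omega

def tightB : List Int → Bool → Int
  | [], _ => 1
  | d :: rest, expectOdd =>
    let start : Int := if expectOdd then 1 else 0
    let below := PySem.Int.floordiv (d - start + 1) 2
    let total := below * 5 ^ rest.length
    if PySem.Int.mod d 2 == start then total + tightB rest (!expectOdd) else total

def solve_alt (num : Int) : Int :=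
  if num == 0 then 0
  else
    let s := pyDigitList num
    shorterB ((s.length : Int) - 1) + tightB s true

-- ===== PRECONDITION & SPEC =====
-- Pre_ excludes negative num, on which both Pythons raise ValueError (int('-') inside map)
def Pre_solve (num : Int) : Prop := 0 ≤ num
instance (num : Int) : Decidable (Pre_solve num) := by unfold Pre_solve; infer_instance
def pvWitness_solve : Int := 1234
def Spec_solve (num : Int) (out : Int) : Prop := out = solve_alt num
instance (num : Int) (out : Int) : Decidable (Spec_solve num out) := by unfold Spec_solve; infer_instance

-- ===== CLAIM (what is proved, stated in full; the proofs are below) =====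
def Claim_equal_solve : Prop := ∀ (num : Int), Dom_solve num → Pre_solve num → Spec_solve num (solve num)

-- ===== LEMMAS AND PROOFS =====

theorem opt_nonneg (x : Option Nat) :
    0 ≤ (Option.map (fun n : Int => n) (do let a ← x; pure ((a : Int)))).getD 0 := by
  cases x <;> simp

theorem char_nonneg (c : Char) : 0 ≤ (PySem.Int.ofChars? [c]).getD 0 := by
  by_cases hsp : PySem.Int.isIntSpace c = true
  · simp only [PySem.Int.ofChars?, List.dropWhile, hsp, List.reverse_nil]
    exact opt_nonneg _
  · unfold PySem.Int.ofChars?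
    simp only [List.dropWhile, hsp, List.reverse_cons, List.reverse_nil, List.nil_append]
    split
    · next ds h => injection h with h1 h2; subst h1; subst h2; decide
    · next ds h => injection h with h1 h2; subst h1; subst h2; decide
    · next h1 h2 => exact opt_nonneg _

theorem digits_nonneg (num : Int) : ∀ d ∈ pyDigitList num, 0 ≤ d := by
  intro d hd
  simp only [pyDigitList, List.mem_map] at hd
  obtain ⟨c, _, rfl⟩ := hd
  exact char_nonneg c

theorem toDigitsCore_ne_nil (b : Nat) : ∀ (fuel n : Nat) (acc : List Char), acc ≠ [] →
    Nat.toDigitsCore b fuel n acc ≠ [] := by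
  intro fuel
  induction fuel with
  | zero => intro n acc h; simpa [Nat.toDigitsCore] using h
  | succ f ih =>
    intro n acc h
    simp only [Nat.toDigitsCore]
    split
    · simp
    · exact ih _ _ (by simp)

theorem pyDigitList_ne_nil (num : Int) (h : ¬ num < 0) : pyDigitList num ≠ [] := by
  simp only [pyDigitList, ne_eq, List.map_eq_nil_iff, PySem.Int.toChars, h, if_false]
  unfold Nat.toDigits
  simp only [Nat.toDigitsCore]
  split
  · simp
  · exact toDigitsCore_ne_nil _ _ _ _ (by simp)

theorem whileCount_eq (fuel : Nat) : ∀ (start cur : Int), (cur - start).toNat ≤ fuel →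
    start ≤ cur + 1 → whileCount start cur = (cur - start + 1) / 2 := by
  induction fuel with
  | zero =>
    intro start cur hf h
    rw [whileCount]
    have : ¬ start < cur := by omega
    rw [if_neg this]
    omega
  | succ f ih =>
    intro start cur hf h
    rw [whileCount]
    split
    · next hlt =>
      rw [ih (start + 2) cur (by omega) (by omega)]
      omega
    · next hge => omega

theorem mod_two_cases (d : Int) : PySem.Int.mod d 2 = 0 ∨ PySem.Int.mod d 2 = 1 := by
  have h1 := PySem.Int.mod_nonneg d (b := 2) (by norm_num)
  have h2 := PySem.Int.mod_lt d (b := 2) (by norm_num)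
  omega

theorem loop_tight (s : List Int) : ∀ (odd : Bool) (ans : Int), (∀ d ∈ s, 0 ≤ d) →
    solveLoop s odd ans = ans + tightB s odd := by
  induction s with
  | nil => intro odd ans _; simp [solveLoop, tightB]
  | cons d rest ih =>
    intro odd ans hnn
    have hd : 0 ≤ d := hnn d (List.mem_cons_self ..)
    simp only [solveLoop, tightB]
    have hstart : (if odd then (1 : Int) else 0) ≤ d + 1 := by
      cases odd <;> simp <;> omega
    have hw : whileCount (if odd then (1 : Int) else 0) d =
        (d - (if odd then (1 : Int) else 0) + 1) / 2 :=
      whileCount_eq (d - (if odd then (1 : Int) else 0)).toNat _ _ (le_refl _) hstart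
    have hfd : PySem.Int.floordiv (d - (if odd then (1 : Int) else 0) + 1) 2 =
        (d - (if odd then (1 : Int) else 0) + 1) / 2 :=
      PySem.Int.floordiv_eq_ediv_of_pos (by norm_num)
    rw [hw, hfd]
    have hrest : ∀ x ∈ rest, (0 : Int) ≤ x := fun x hx => hnn x (List.mem_cons_of_mem _ hx)
    rcases mod_two_cases d with hm | hm <;> cases odd <;>
      simp only [hm, bne_iff_ne, ne_eq, beq_iff_eq] <;> norm_num <;>
      rw [ih _ _ hrest] <;> ring

theorem shorter_mul (k : Nat) : 4 * shorterB (k : Int) = 5 ^ (k + 1) - 5 := by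
  induction k with
  | zero => rw [shorterB]; norm_num
  | succ n ih =>
    rw [shorterB]
    have hn : ¬ ((n + 1 : Nat) : Int) ≤ 0 := by push_cast; omega
    rw [if_neg hn]
    have ht : (((n + 1 : Nat) : Int)).toNat = n + 1 := by omega
    have hc : ((n + 1 : Nat) : Int) - 1 = (n : Int) := by push_cast; ring
    rw [ht, hc, mul_add, ih]
    ring

theorem shorter_floordiv (l : Nat) (hl : 1 ≤ l) :
    PySem.Int.floordiv (5 ^ l - 5) 4 = shorterB ((l : Int) - 1) := by
  have hc : (l : Int) - 1 = ((l - 1 : Nat) : Int) := by omega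
  have hm := shorter_mul (l - 1)
  have hll : l - 1 + 1 = l := by omega
  rw [hll] at hm
  rw [PySem.Int.floordiv_eq_ediv_of_pos (by norm_num), hc, ← hm,
    Int.mul_ediv_cancel_left _ (by norm_num)]

-- ===== VERDICT (by name: the statement is the Claim_ definition above) =====
theorem solve_spec : Claim_equal_solve := by
  intro num _ hpre
  unfold Spec_solve solve solve_alt
  by_cases h0 : num == 0
  · simp [h0]
  · simp only [h0]
    have hne : pyDigitList num ≠ [] := pyDigitList_ne_nil num (by unfold Pre_solve at hpre; omega)
    have hl : 1 ≤ (pyDigitList num).length := List.length_pos_iff.mpr hne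
    rw [shorter_floordiv _ hl, loop_tight _ _ _ (digits_nonneg num)]
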